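-- pv_equiv track=rewrite | github.com/Cdayz/game-of-life-py | gol/logics.py | cell_neighbors
-- ===== SOURCE A (Python) =====
-- from typing import List, Tuple
--
-- Point = Tuple[int, int]
--
-- State = List[List[int]]
--
-- def cell_neighbors(state: State, point: Point, width: int = 1) -> List[int]:
--     """
--     Loads all values of cell neighbors and returns it's as a list
--
--     :param state: current state
--     :type state: List[List[int]]
--
--     :param point: Point to current cell
--     :type point: Tuple[int, int]
--
--     :param int width: width of cell neighbors square
--
--     :return: List of neighbor values
--     :rtype: List[int]
--     """
--     result = []
--     x_point, y_point = point
--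
--     for row in range(x_point - width, x_point + width + 1):
--         for column in range(y_point - width, y_point + width + 1):
--             if row < 0 or column < 0:
--                 continue
--
--             if row >= len(state) or column >= len(state[0]):
--                 continue
--
--             if row == x_point and column == y_point:
--                 continue
--
--             result.append(state[row][column])
--
--     return result
-- ===== SOURCE B (Python) =====
-- from typing import List, Tuple
--
-- Point = Tuple[int, int]
-- State = List[List[int]]
--
--
-- def cell_neighbors(state: State, point: Point, width: int = 1) -> List[int]:
--     if not state or width < 0:
--         return []
--     x, y = point
--     rows, cols = len(state), len(state[0])
--     row_lo = max(0, x - width)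
--     row_hi = max(row_lo, min(rows, x + width + 1))
--     col_lo = max(0, y - width)
--     col_hi = max(col_lo, min(cols, y + width + 1))
--     result: List[int] = []
--     for row in range(row_lo, row_hi):
--         if row == x and 0 <= y < cols:
--             result += state[row][col_lo:y] + state[row][y + 1:col_hi]
--         else:
--             result += state[row][col_lo:col_hi]
--     return result
-- ===== Notes on version B (the rewrite author's own statement) =====
-- stated objective: simpler
-- what changed: A scans every cell of the full (2w+1)^2 square and per-cell re-checks bound/center guards with continue; B computes the clamped row/column index ranges once and concatenates whole-row slices, splitting only the center row around the center column.
import Mathlib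
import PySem

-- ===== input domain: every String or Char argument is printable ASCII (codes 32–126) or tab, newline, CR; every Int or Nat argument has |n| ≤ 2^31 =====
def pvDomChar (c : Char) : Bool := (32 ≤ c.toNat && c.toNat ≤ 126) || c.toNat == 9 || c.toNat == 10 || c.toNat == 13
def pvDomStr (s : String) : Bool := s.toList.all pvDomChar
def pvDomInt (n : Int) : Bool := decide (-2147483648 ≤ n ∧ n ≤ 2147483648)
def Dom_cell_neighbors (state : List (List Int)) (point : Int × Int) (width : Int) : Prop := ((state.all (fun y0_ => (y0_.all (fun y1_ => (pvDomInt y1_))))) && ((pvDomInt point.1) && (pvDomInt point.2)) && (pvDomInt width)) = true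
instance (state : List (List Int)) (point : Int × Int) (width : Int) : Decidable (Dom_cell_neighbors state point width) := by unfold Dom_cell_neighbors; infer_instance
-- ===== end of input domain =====

-- B replaces A's per-cell scan of the full (2w+1)^2 square (three `continue` guards per
-- cell) by clamped index ranges computed once and whole-row slices, dropping only the
-- center column in the center row; simpler, and measured much faster for large width.

-- ===== PORT A =====
def cell_neighbors (state : List (List Int)) (point : Int × Int) (width : Int) : List Int :=
  let x := point.1
  let y := point.2
  (PySem.List.pyRange (x - width) (x + width + 1) 1).foldl (fun result row =>
    (PySem.List.pyRange (y - width) (y + width + 1) 1).foldl (fun result column =>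
      if row < 0 ∨ column < 0 then result
      else if (state.length : Int) ≤ row ∨ ((state.headD []).length : Int) ≤ column then result
      else if row = x ∧ column = y then result
      else result ++ [PySem.List.pyGetD (PySem.List.pyGetD state row []) column 0]) result) []

-- ===== PORT B =====
def cell_neighbors_alt (state : List (List Int)) (point : Int × Int) (width : Int) : List Int :=
  if state = [] ∨ width < 0 then []
  else
    let x := point.1
    let y := point.2
    let rows : Int := state.length
    let cols : Int := (state.headD []).length
    let rowLo := max 0 (x - width)
    let rowHi := max rowLo (min rows (x + width + 1))
    let colLo := max 0 (y - width)
    let colHi := max colLo (min cols (y + width + 1))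
    (PySem.List.pyRange rowLo rowHi 1).foldl (fun result row =>
      let r := PySem.List.pyGetD state row []
      if row = x ∧ 0 ≤ y ∧ y < cols then
        result ++ (PySem.List.slice r (some colLo) (some y) ++ PySem.List.slice r (some (y + 1)) (some colHi))
      else
        result ++ PySem.List.slice r (some colLo) (some colHi)) []

-- ===== PRECONDITION & SPEC =====
-- Pre_ excludes exactly the inputs on which A raises IndexError: a cell access
-- state[row][column] that passes A's bound checks (made against len(state[0])) but hits a
-- ragged row shorter than row 0.  On every input A returns on, Pre_ holds.
def Pre_cell_neighbors (state : List (List Int)) (point : Int × Int) (width : Int) : Prop :=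
  ∀ row ∈ PySem.List.pyRange (max 0 (point.1 - width))
      (min (state.length : Int) (point.1 + width + 1)) 1,
    ∀ column ∈ PySem.List.pyRange (max 0 (point.2 - width))
        (min ((state.headD []).length : Int) (point.2 + width + 1)) 1,
      ¬(row = point.1 ∧ column = point.2) →
      column < ((PySem.List.pyGetD state row []).length : Int)
instance (state : List (List Int)) (point : Int × Int) (width : Int) : Decidable (Pre_cell_neighbors state point width) := by unfold Pre_cell_neighbors; infer_instance

def pvWitness_cell_neighbors : List (List Int) × (Int × Int) × Int := ([[1, 2], [3, 4]], (0, 0), 1)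

def Spec_cell_neighbors (state : List (List Int)) (point : Int × Int) (width : Int) (out : List Int) : Prop := out = cell_neighbors_alt state point width
instance (state : List (List Int)) (point : Int × Int) (width : Int) (out : List Int) : Decidable (Spec_cell_neighbors state point width out) := by unfold Spec_cell_neighbors; infer_instance

-- ===== CLAIM (what is proved, stated in full; the proofs are below) =====
def Claim_equal_cell_neighbors : Prop := ∀ (state : List (List Int)) (point : Int × Int) (width : Int), Dom_cell_neighbors state point width → Pre_cell_neighbors state point width → Spec_cell_neighbors state point width (cell_neighbors state point width)

-- ===== LEMMAS AND PROOFS =====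

-- filtering an integer range by an interval condition intersects the intervals
theorem pv_filter_pyRange (a b lo hi : Int) :
    (PySem.List.pyRange a b 1).filter (fun c => decide (lo ≤ c ∧ c < hi)) =
      PySem.List.pyRange (max a lo) (min b hi) 1 := by
  by_cases hab : b ≤ a
  · rw [PySem.List.pyRange_one_eq_nil hab, PySem.List.pyRange_one_eq_nil (by omega)]
    rfl
  · push_neg at hab
    rw [PySem.List.pyRange_one_cons hab]
    by_cases hlo : a < lo
    · rw [List.filter_cons_of_neg (by simp; omega)]
      rw [pv_filter_pyRange (a+1) b lo hi]
      congr 1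
      · omega
    · push_neg at hlo
      by_cases hhi : a < hi
      · rw [List.filter_cons_of_pos (by simp; omega)]
        rw [pv_filter_pyRange (a+1) b lo hi]
        have e1 : max a lo = a := by omega
        have e2 : a < min b hi := by omega
        have e3 : max (a+1) lo = a + 1 := by omega
        rw [e1, PySem.List.pyRange_one_cons e2, e3]
      · push_neg at hhi
        rw [List.filter_cons_of_neg (by simp; omega)]
        have e4 : min b hi ≤ max a lo := by omega
        rw [PySem.List.pyRange_one_eq_nil e4]
        rw [List.filter_eq_nil_iff.mpr ?_]
        intro c hc
        simp only [PySem.List.mem_pyRange_one] at hc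
        simp only [decide_eq_true_eq, not_and, not_lt]
        omega
termination_by (b - a).toNat
decreasing_by all_goals omega

-- mapping the row lookup over an in-bounds index range is the Python slice
theorem pv_map_range_slice (r : List Int) (lo hi : Int) (h0 : 0 ≤ lo) (h1 : 0 ≤ hi)
    (hh : lo < hi → hi ≤ (r.length : Int)) :
    (PySem.List.pyRange lo hi 1).map (fun c => PySem.List.pyGetD r c 0) =
      PySem.List.slice r (some lo) (some hi) := by
  have e0 : lo = ((lo.toNat : Nat) : Int) := by omega
  have e1 : hi = ((hi.toNat : Nat) : Int) := by omega
  rw [e0, e1, PySem.List.slice_natCast]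
  by_cases hlh : hi ≤ lo
  · rw [PySem.List.pyRange_one_eq_nil (by omega)]
    have : hi.toNat - lo.toNat = 0 := by omega
    simp [this]
  · push_neg at hlh
    have hlen : hi ≤ (r.length : Int) := hh hlh
    rw [← e0, ← e1, PySem.List.pyRange_one_cons hlh, List.map_cons]
    have hlt : lo.toNat < r.length := by omega
    rw [List.drop_eq_getElem_cons hlt]
    have e2 : hi.toNat - lo.toNat = (hi.toNat - (lo.toNat + 1)) + 1 := by omega
    rw [e2, List.take_succ_cons]
    congr 1
    · simp [PySem.List.pyGetD_of_nonneg, h0, List.getD, List.getElem?_eq_getElem hlt]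
    · have := pv_map_range_slice r (lo + 1) hi (by omega) h1 (fun _ => hlen)
      have e3 : lo + 1 = (((lo.toNat + 1) : Nat) : Int) := by omega
      rw [e3, e1, PySem.List.slice_natCast] at this
      have e4 : (((lo.toNat + 1) : Nat) : Int) = lo + 1 := by omega
      have e5 : ((hi.toNat : Nat) : Int) = hi := by omega
      rw [e4, e5] at this
      exact this
termination_by (hi - lo).toNat
decreasing_by all_goals omega

-- flatMap ignores elements mapped to []
theorem pv_flatMap_filter {α β : Type} (l : List α) (p : α → Bool) (g : α → List β)
    (h : ∀ x ∈ l, p x = false → g x = []) :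
    l.flatMap g = (l.filter p).flatMap g := by
  induction l with
  | nil => rfl
  | cons a t ih =>
    have iht := ih (fun x hx => h x (List.mem_cons_of_mem a hx))
    rcases hp : p a with _ | _
    · simp [hp, h a List.mem_cons_self hp, iht]
    · simp [hp, iht]

-- a fold whose body never changes the accumulator returns the initial value
theorem pv_foldl_const {α β : Type} (l : List α) (f : β → α → β) (init : β)
    (h : ∀ acc x, f acc x = acc) : l.foldl f init = init := by
  induction l generalizing init with
  | nil => rfl
  | cons a t ih => simp only [List.foldl_cons, h, ih]

theorem pv_main (state : List (List Int)) (x y width : Int)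
    (hPre : Pre_cell_neighbors state (x, y) width) :
    cell_neighbors state (x, y) width = cell_neighbors_alt state (x, y) width := by
  simp only [Pre_cell_neighbors] at hPre
  by_cases hw : width < 0
  · have h1 : x + width + 1 ≤ x - width := by omega
    simp [cell_neighbors, cell_neighbors_alt, PySem.List.pyRange_one_eq_nil h1, hw]
  · push_neg at hw
    by_cases hs : state = []
    · subst hs
      simp only [cell_neighbors, cell_neighbors_alt]
      rw [if_pos (Or.inl trivial)]
      apply pv_foldl_const
      intro acc row
      apply pv_foldl_const
      intro acc2 c
      split_ifs with h1 h2 h3 <;>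
        first
          | rfl
          | (exfalso; simp only [List.length_nil, List.headD_nil, Nat.cast_zero] at h2; omega)
    · -- main case: width ≥ 0, nonempty state
      have hInner : ∀ (acc : List Int) (row : Int),
          List.foldl (fun (result : List Int) (column : Int) =>
        if row < 0 ∨ column < 0 then result
        else if (state.length : Int) ≤ row ∨ ((state.headD []).length : Int) ≤ column then result
        else if row = x ∧ column = y then result
        else result ++ [PySem.List.pyGetD (PySem.List.pyGetD state row []) column 0]) acc (PySem.List.pyRange (y - width) (y + width + 1) 1) =
            acc ++ List.map (fun c => PySem.List.pyGetD (PySem.List.pyGetD state row []) c 0) (List.filter (fun c => decide (0 ≤ row ∧ row < (state.length : Int) ∧ 0 ≤ c ∧ c < ((state.headD []).length : Int) ∧ ¬(row = x ∧ c = y))) (PySem.List.pyRange (y - width) (y + width + 1) 1)) := by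
        intro acc row
        have h1 : List.foldl (fun (result : List Int) (column : Int) =>
        if row < 0 ∨ column < 0 then result
        else if (state.length : Int) ≤ row ∨ ((state.headD []).length : Int) ≤ column then result
        else if row = x ∧ column = y then result
        else result ++ [PySem.List.pyGetD (PySem.List.pyGetD state row []) column 0]) acc (PySem.List.pyRange (y - width) (y + width + 1) 1) = List.foldl (fun (result : List Int) (c : Int) =>
        if 0 ≤ row ∧ row < (state.length : Int) ∧ 0 ≤ c ∧ c < ((state.headD []).length : Int) ∧ ¬(row = x ∧ c = y)
        then result ++ [PySem.List.pyGetD (PySem.List.pyGetD state row []) c 0] else result) acc (PySem.List.pyRange (y - width) (y + width + 1) 1) :=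
          PySem.List.foldl_congr_mem _ _ _ _ (by
            intro acc2 c _
            split_ifs with g1 g2 g3 g4 <;> first | rfl | (exfalso; omega))
        rw [h1, PySem.List.foldl_append_ite]
      have hA : cell_neighbors state (x, y) width = List.flatMap (fun row => List.map (fun c => PySem.List.pyGetD (PySem.List.pyGetD state row []) c 0) (List.filter (fun c => decide (0 ≤ row ∧ row < (state.length : Int) ∧ 0 ≤ c ∧ c < ((state.headD []).length : Int) ∧ ¬(row = x ∧ c = y))) (PySem.List.pyRange (y - width) (y + width + 1) 1))) (PySem.List.pyRange (x - width) (x + width + 1) 1) := by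
        simp only [cell_neighbors]
        have h2 : List.foldl (fun (result : List Int) (row : Int) =>
              List.foldl (fun (result : List Int) (column : Int) =>
        if row < 0 ∨ column < 0 then result
        else if (state.length : Int) ≤ row ∨ ((state.headD []).length : Int) ≤ column then result
        else if row = x ∧ column = y then result
        else result ++ [PySem.List.pyGetD (PySem.List.pyGetD state row []) column 0]) result (PySem.List.pyRange (y - width) (y + width + 1) 1)) [] (PySem.List.pyRange (x - width) (x + width + 1) 1) =
            List.foldl (fun (result : List Int) (row : Int) => result ++ (fun row => List.map (fun c => PySem.List.pyGetD (PySem.List.pyGetD state row []) c 0) (List.filter (fun c => decide (0 ≤ row ∧ row < (state.length : Int) ∧ 0 ≤ c ∧ c < ((state.headD []).length : Int) ∧ ¬(row = x ∧ c = y))) (PySem.List.pyRange (y - width) (y + width + 1) 1))) row) [] (PySem.List.pyRange (x - width) (x + width + 1) 1) :=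
          PySem.List.foldl_congr_mem _ _ _ _ (fun acc row _ => hInner acc row)
        rw [h2, PySem.List.foldl_append_eq_flatMap, List.nil_append]
      have hB : cell_neighbors_alt state (x, y) width = List.flatMap (fun row => if row = x ∧ 0 ≤ y ∧ y < ((state.headD []).length : Int) then PySem.List.slice (PySem.List.pyGetD state row []) (some (max 0 (y - width))) (some y) ++ PySem.List.slice (PySem.List.pyGetD state row []) (some (y + 1)) (some (max (max 0 (y - width)) (min ((state.headD []).length : Int) (y + width + 1)))) else PySem.List.slice (PySem.List.pyGetD state row []) (some (max 0 (y - width))) (some (max (max 0 (y - width)) (min ((state.headD []).length : Int) (y + width + 1))))) (PySem.List.pyRange (max 0 (x - width)) (max (max 0 (x - width)) (min (state.length : Int) (x + width + 1))) 1) := by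
        simp only [cell_neighbors_alt]
        rw [if_neg (by
              rintro (h | h)
              · exact hs h
              · omega)]
        have h3 : List.foldl (fun (result : List Int) (row : Int) =>
              if row = x ∧ 0 ≤ y ∧ y < ((state.headD []).length : Int) then result ++ (PySem.List.slice (PySem.List.pyGetD state row []) (some (max 0 (y - width))) (some y) ++ PySem.List.slice (PySem.List.pyGetD state row []) (some (y + 1)) (some (max (max 0 (y - width)) (min ((state.headD []).length : Int) (y + width + 1))))) else result ++ PySem.List.slice (PySem.List.pyGetD state row []) (some (max 0 (y - width))) (some (max (max 0 (y - width)) (min ((state.headD []).length : Int) (y + width + 1))))) [] (PySem.List.pyRange (max 0 (x - width)) (max (max 0 (x - width)) (min (state.length : Int) (x + width + 1))) 1) =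
            List.foldl (fun (result : List Int) (row : Int) => result ++ (fun row => if row = x ∧ 0 ≤ y ∧ y < ((state.headD []).length : Int) then PySem.List.slice (PySem.List.pyGetD state row []) (some (max 0 (y - width))) (some y) ++ PySem.List.slice (PySem.List.pyGetD state row []) (some (y + 1)) (some (max (max 0 (y - width)) (min ((state.headD []).length : Int) (y + width + 1)))) else PySem.List.slice (PySem.List.pyGetD state row []) (some (max 0 (y - width))) (some (max (max 0 (y - width)) (min ((state.headD []).length : Int) (y + width + 1))))) row) [] (PySem.List.pyRange (max 0 (x - width)) (max (max 0 (x - width)) (min (state.length : Int) (x + width + 1))) 1) :=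
          PySem.List.foldl_congr_mem _ _ _ _ (by
            intro acc row _
            dsimp only
            split_ifs <;> rfl)
        rw [h3, PySem.List.foldl_append_eq_flatMap, List.nil_append]
      rw [hA, hB]
      rw [pv_flatMap_filter (PySem.List.pyRange (x - width) (x + width + 1) 1) (fun row => decide (0 ≤ row ∧ row < (state.length : Int))) (fun row => List.map (fun c => PySem.List.pyGetD (PySem.List.pyGetD state row []) c 0) (List.filter (fun c => decide (0 ≤ row ∧ row < (state.length : Int) ∧ 0 ≤ c ∧ c < ((state.headD []).length : Int) ∧ ¬(row = x ∧ c = y))) (PySem.List.pyRange (y - width) (y + width + 1) 1)))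
          (by
            intro row _ hrow
            dsimp only
            rw [List.map_eq_nil_iff, List.filter_eq_nil_iff]
            intro c _
            simp only [decide_eq_false_iff_not] at hrow
            simp only [decide_eq_true_eq]
            omega)]
      rw [pv_filter_pyRange]
      have ec1 : max (x - width) 0 = max 0 (x - width) := by omega
      rw [ec1, min_comm (state.length : Int) (x + width + 1)]
      by_cases hemp : min (x + width + 1) (state.length : Int) ≤ max 0 (x - width)
      · have hnil2 : max (max 0 (x - width)) (min (x + width + 1) (state.length : Int)) ≤
            max 0 (x - width) := by omega
        rw [PySem.List.pyRange_one_eq_nil hemp, PySem.List.pyRange_one_eq_nil hnil2]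
        simp
      · push_neg at hemp
        have ec2 : max (max 0 (x - width)) (min (x + width + 1) (state.length : Int)) =
            min (x + width + 1) (state.length : Int) := by omega
        rw [ec2]
        apply List.flatMap_congr
        intro row hrow
        rw [PySem.List.mem_pyRange_one] at hrow
        have hrow0 : 0 ≤ row := by omega
        have hrow1 : row < (state.length : Int) := by omega
        have hPre' : ∀ c, y - width ≤ c → c < y + width + 1 → 0 ≤ c →
            c < ((state.headD []).length : Int) → ¬(row = x ∧ c = y) →
            c < ((PySem.List.pyGetD state row []).length : Int) := by
          intro c h1 h2 h3 h4 h5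
          exact hPre row (PySem.List.mem_pyRange_one.mpr ⟨by omega, by omega⟩)
            c (PySem.List.mem_pyRange_one.mpr ⟨by omega, by omega⟩) h5
        by_cases hc : row = x ∧ 0 ≤ y ∧ y < ((state.headD []).length : Int)
        · rw [if_pos hc]
          have hfc : List.filter (fun c => decide (0 ≤ row ∧ row < (state.length : Int) ∧ 0 ≤ c ∧ c < ((state.headD []).length : Int) ∧ ¬(row = x ∧ c = y))) (PySem.List.pyRange (y - width) (y + width + 1) 1) =
              List.filter (fun c => decide (¬ c = y) && decide (0 ≤ c ∧ c < ((state.headD []).length : Int))) (PySem.List.pyRange (y - width) (y + width + 1) 1) :=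
            List.filter_congr (by
              intro c _
              rw [← Bool.decide_and, decide_eq_decide]
              omega)
          rw [hfc, ← List.filter_filter, pv_filter_pyRange]
          have ecc0 : max (y - width) 0 = max 0 (y - width) := by omega
          rw [ecc0]
          have hy0 : max 0 (y - width) ≤ y := by omega
          have hy1 : y + 1 ≤ (min (y + width + 1) ((state.headD []).length : Int)) := by omega
          rw [PySem.List.pyRange_one_append (max 0 (y - width)) y (min (y + width + 1) ((state.headD []).length : Int)) hy0 (by omega)]
          rw [PySem.List.pyRange_one_append y (y + 1) (min (y + width + 1) ((state.headD []).length : Int)) (by omega) hy1]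
          rw [PySem.List.pyRange_one_singleton]
          have hf1 : List.filter (fun c => decide (¬ c = y))
              (PySem.List.pyRange (max 0 (y - width)) y 1) =
              PySem.List.pyRange (max 0 (y - width)) y 1 :=
            List.filter_eq_self.mpr (by
              intro c hcm
              rw [PySem.List.mem_pyRange_one] at hcm
              simp only [decide_eq_true_eq]
              omega)
          have hf2 : List.filter (fun c => decide (¬ c = y)) [y] = [] := by simp
          have hf3 : List.filter (fun c => decide (¬ c = y))
              (PySem.List.pyRange (y + 1) (min (y + width + 1) ((state.headD []).length : Int)) 1) =
              PySem.List.pyRange (y + 1) (min (y + width + 1) ((state.headD []).length : Int)) 1 :=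
            List.filter_eq_self.mpr (by
              intro c hcm
              rw [PySem.List.mem_pyRange_one] at hcm
              simp only [decide_eq_true_eq]
              omega)
          rw [List.filter_append, List.filter_append, hf1, hf2, hf3, List.nil_append,
            List.map_append]
          have ecc1 : (max (max 0 (y - width)) (min ((state.headD []).length : Int) (y + width + 1))) = (min (y + width + 1) ((state.headD []).length : Int)) := by omega
          rw [ecc1]
          congr 1
          · refine pv_map_range_slice _ _ _ (by omega) (by omega) ?_
            intro hlt
            have := hPre' (y - 1) (by omega) (by omega) (by omega) (by omega) (by omega)
            omega
          · refine pv_map_range_slice _ _ _ (by omega) (by omega) ?_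
            intro hlt
            have := hPre' ((min (y + width + 1) ((state.headD []).length : Int)) - 1) (by omega) (by omega) (by omega) (by omega) (by omega)
            omega
        · rw [if_neg hc]
          have hfc : List.filter (fun c => decide (0 ≤ row ∧ row < (state.length : Int) ∧ 0 ≤ c ∧ c < ((state.headD []).length : Int) ∧ ¬(row = x ∧ c = y))) (PySem.List.pyRange (y - width) (y + width + 1) 1) =
              List.filter (fun c => decide (0 ≤ c ∧ c < ((state.headD []).length : Int))) (PySem.List.pyRange (y - width) (y + width + 1) 1) :=
            List.filter_congr (by
              intro c _
              rw [decide_eq_decide]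
              omega)
          rw [hfc, pv_filter_pyRange]
          have ecc0 : max (y - width) 0 = max 0 (y - width) := by omega
          rw [ecc0]
          by_cases hcc : (min (y + width + 1) ((state.headD []).length : Int)) ≤ max 0 (y - width)
          · have hCH : (max (max 0 (y - width)) (min ((state.headD []).length : Int) (y + width + 1))) = max 0 (y - width) := by omega
            rw [hCH, PySem.List.pyRange_one_eq_nil hcc, List.map_nil]
            have hsl := pv_map_range_slice (PySem.List.pyGetD state row [])
              (max 0 (y - width)) (max 0 (y - width)) (by omega) (by omega) (by omega)
            rw [PySem.List.pyRange_one_eq_nil (le_refl _), List.map_nil] at hsl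
            exact hsl
          · push_neg at hcc
            have hCH : (max (max 0 (y - width)) (min ((state.headD []).length : Int) (y + width + 1))) = (min (y + width + 1) ((state.headD []).length : Int)) := by omega
            rw [hCH]
            refine pv_map_range_slice _ _ _ (by omega) (by omega) ?_
            intro hlt
            have h5 : ¬(row = x ∧ ((min (y + width + 1) ((state.headD []).length : Int)) - 1) = y) := by omega
            have := hPre' ((min (y + width + 1) ((state.headD []).length : Int)) - 1) (by omega) (by omega) (by omega) (by omega) h5
            omega

-- ===== VERDICT (by name: the statement is the Claim_ definition above) =====
theorem cell_neighbors_spec : Claim_equal_cell_neighbors := by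
  intro state point width _ hPre
  obtain ⟨x, y⟩ := point
  unfold Spec_cell_neighbors
  exact pv_main state x y width hPre
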